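-- pv_equiv track=rewrite | github.com/mlei06/Clinical-Deidentification-Playground | src/clinical_deid/ingest/mimic/brat_merge.py | merge_adjacent_names
-- ===== SOURCE A (Python) =====
-- BratT = tuple[int, int, str, str]
--
-- _MERGEABLE_NAME_TYPES: frozenset[str] = frozenset({"NAME", "PATIENT"})
--
-- def _dedup_words(text: str) -> str:
--     """Remove consecutive duplicate words: 'Heather Heather Cochran' → 'Heather Cochran'."""
--     words = text.split()
--     if not words:
--         return text
--     result = [words[0]]
--     for w in words[1:]:
--         if w.lower() != result[-1].lower():
--             result.append(w)
--     return " ".join(result)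
--
-- def merge_adjacent_names(annotations: list[BratT], text_content: str) -> list[BratT]:
--     if not annotations:
--         return annotations
--     sorted_anns = sorted(annotations, key=lambda x: x[0])
--     merged: list[BratT] = []
--     cur = list(sorted_anns[0])
--
--     for next_ann in sorted_anns[1:]:
--         if cur[2] in _MERGEABLE_NAME_TYPES and next_ann[2] == cur[2]:
--             between_text = text_content[cur[1] : next_ann[0]]
--             if between_text == " ":
--                 cur[1] = next_ann[1]
--                 cur[3] = _dedup_words(cur[3] + " " + next_ann[3])
--             else:
--                 merged.append(tuple(cur))  # type: ignore[arg-type]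
--                 cur = list(next_ann)
--         else:
--             merged.append(tuple(cur))  # type: ignore[arg-type]
--             cur = list(next_ann)
--
--     merged.append(tuple(cur))  # type: ignore[arg-type]
--     return merged
-- ===== SOURCE B (Python) =====
-- _MERGEABLE_NAME_TYPES: frozenset[str] = frozenset({"NAME", "PATIENT"})
--
-- def _dedup_words(text: str) -> str:
--     words = text.split()
--     if not words:
--         return text
--     result = [words[0]]
--     for w in words[1:]:
--         if w.lower() != result[-1].lower():
--             result.append(w)
--     return " ".join(result)
--
-- def _reduce_run(run):
--     # A singleton run is emitted unchanged; a longer run is folded into one span.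
--     if len(run) == 1:
--         return run[0]
--     start, end, typ, text = run[0]
--     for a in run[1:]:
--         text = _dedup_words(text + " " + a[3])
--         end = a[1]
--     return (start, end, typ, text)
--
-- def merge_adjacent_names(annotations, text_content):
--     if not annotations:
--         return annotations
--     s = sorted(annotations, key=lambda x: x[0])
--     # Partition the sorted list into maximal runs: a run extends to the next
--     # annotation iff the previous element's type is mergeable, the types match,
--     # and exactly one space separates them in the text.
--     runs = []
--     run = [s[0]]
--     for nxt in s[1:]:
--         p = run[-1]
--         if p[2] in _MERGEABLE_NAME_TYPES and nxt[2] == p[2] \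
--                 and text_content[p[1]:nxt[0]] == " ":
--             run.append(nxt)
--         else:
--             runs.append(run)
--             run = [nxt]
--     runs.append(run)
--     return [_reduce_run(r) for r in runs]
-- ===== Notes on version B (the rewrite author's own statement) =====
-- stated objective: alternative
-- what changed: Replaces A's fused merge loop (mutable current annotation, emit-on-break) with a group-then-reduce decomposition: sort, partition into maximal mergeable runs using only the neighbouring elements, then map each run to its merged tuple in a second pass.
import Mathlib
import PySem

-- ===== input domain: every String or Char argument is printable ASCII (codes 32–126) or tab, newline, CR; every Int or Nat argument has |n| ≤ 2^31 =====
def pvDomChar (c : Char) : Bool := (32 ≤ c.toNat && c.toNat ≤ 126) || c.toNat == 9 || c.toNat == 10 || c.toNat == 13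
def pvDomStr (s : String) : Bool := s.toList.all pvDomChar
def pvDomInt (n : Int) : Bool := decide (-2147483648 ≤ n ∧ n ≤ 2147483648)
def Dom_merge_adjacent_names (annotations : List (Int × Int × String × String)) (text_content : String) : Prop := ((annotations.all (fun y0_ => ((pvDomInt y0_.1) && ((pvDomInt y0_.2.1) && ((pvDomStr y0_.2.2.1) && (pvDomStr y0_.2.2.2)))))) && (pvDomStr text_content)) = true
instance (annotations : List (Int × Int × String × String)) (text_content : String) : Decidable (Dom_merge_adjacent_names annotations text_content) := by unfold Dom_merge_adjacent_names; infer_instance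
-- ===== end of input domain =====

-- B replaces A's fused merge loop with a group-then-reduce decomposition (sort, partition into
-- maximal mergeable runs, then reduce each run); same cost, alternative structure.


abbrev Brat := Int × Int × String × String

-- ===== PORT A =====
-- _dedup_words, shared by both Pythons (result list kept reversed; result[-1] = head)
def dedupWords (text : String) : String :=
  match PySem.Str.split₀ text with
  | [] => text
  | w0 :: rest =>
    let result := rest.foldl
      (fun acc w => if PySem.Str.lower w ≠ PySem.Str.lower acc.headI then w :: acc else acc) [w0]
    PySem.Str.join " " result.reverse

-- the body of A's for-loop: state (merged, cur)
def mergeStepA (text_content : String) (st : List Brat × Brat) (next_ann : Brat) : List Brat × Brat :=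
  let merged := st.1
  let cur := st.2
  if (cur.2.2.1 = "NAME" ∨ cur.2.2.1 = "PATIENT") ∧ next_ann.2.2.1 = cur.2.2.1 then
    if PySem.Str.slice text_content (some cur.2.1) (some next_ann.1) = " " then
      (merged, (cur.1, next_ann.2.1, cur.2.2.1, dedupWords (cur.2.2.2 ++ " " ++ next_ann.2.2.2)))
    else
      (merged ++ [cur], next_ann)
  else
    (merged ++ [cur], next_ann)

def merge_adjacent_names (annotations : List (Int × Int × String × String)) (text_content : String) : List (Int × Int × String × String) :=
  if annotations = [] then annotations else
  match PySem.List.sorted annotations (fun x => x.1) with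
  | [] => []
  | c :: rest =>
    (rest.foldl (mergeStepA text_content) ([], c)).1 ++ [(rest.foldl (mergeStepA text_content) ([], c)).2]

-- ===== PORT B =====
-- does the run whose last element is p extend to nxt?
def runExtends (text_content : String) (p nxt : Brat) : Bool :=
  decide ((p.2.2.1 = "NAME" ∨ p.2.2.1 = "PATIENT") ∧ nxt.2.2.1 = p.2.2.1 ∧
          PySem.Str.slice text_content (some p.2.1) (some nxt.1) = " ")

-- one step of _reduce_run's fold
def redStep (cur a : Brat) : Brat :=
  (cur.1, a.2.1, cur.2.2.1, dedupWords (cur.2.2.2 ++ " " ++ a.2.2.2))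

-- _reduce_run (runs are never empty; [] branch is unreachable)
def reduceRun (run : List Brat) : Brat :=
  match run with
  | [] => (0, 0, "", "")
  | x :: xs => if xs = [] then x else xs.foldl redStep x

-- grouping step: state (runs, run) with the current run kept REVERSED (run[-1] = head)
def groupStepB (text_content : String) (st : List (List Brat) × List Brat) (nxt : Brat) : List (List Brat) × List Brat :=
  if runExtends text_content st.2.headI nxt then (st.1, nxt :: st.2)
  else (st.1 ++ [st.2.reverse], [nxt])

def merge_adjacent_names_alt (annotations : List (Int × Int × String × String)) (text_content : String) : List (Int × Int × String × String) :=
  if annotations = [] then annotations else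
  match PySem.List.sorted annotations (fun x => x.1) with
  | [] => []
  | c :: rest =>
    ((rest.foldl (groupStepB text_content) ([], [c])).1
      ++ [(rest.foldl (groupStepB text_content) ([], [c])).2.reverse]).map reduceRun

-- ===== PRECONDITION & SPEC =====
def Spec_merge_adjacent_names (annotations : List (Int × Int × String × String)) (text_content : String) (out : List (Int × Int × String × String)) : Prop := out = merge_adjacent_names_alt annotations text_content
instance (annotations : List (Int × Int × String × String)) (text_content : String) (out : List (Int × Int × String × String)) : Decidable (Spec_merge_adjacent_names annotations text_content out) := by unfold Spec_merge_adjacent_names; infer_instance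

-- ===== CLAIM (what is proved, stated in full; the proofs are below) =====
def Claim_equal_merge_adjacent_names : Prop := ∀ (annotations : List (Int × Int × String × String)) (text_content : String), Dom_merge_adjacent_names annotations text_content → Spec_merge_adjacent_names annotations text_content (merge_adjacent_names annotations text_content)

-- ===== LEMMAS AND PROOFS =====

-- the last element of the run f :: mid
def lastOf (f : Brat) (mid : List Brat) : Brat := mid.getLast?.getD f

-- every element of the current run has the type of its first element
def uniform (f : Brat) (mid : List Brat) : Prop := ∀ x ∈ mid, x.2.2.1 = f.2.2.1

theorem reduceRun_cons (f : Brat) (mid : List Brat) : reduceRun (f :: mid) = mid.foldl redStep f := by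
  cases mid <;> simp [reduceRun]

theorem redFold_type (f : Brat) (mid : List Brat) : (mid.foldl redStep f).2.2.1 = f.2.2.1 := by
  induction mid generalizing f with
  | nil => rfl
  | cons a t ih => simp only [List.foldl_cons]; exact ih (redStep f a)

theorem getLast?_cons_getD (f : Brat) (mid : List Brat) :
    (f :: mid).getLast? = some (lastOf f mid) := by
  induction mid generalizing f with
  | nil => rfl
  | cons a t ih =>
    rw [List.getLast?_cons_cons, ih a]
    simp only [lastOf, ih a, Option.getD_some]

theorem redFold_end (f : Brat) (mid : List Brat) :
    (mid.foldl redStep f).2.1 = (lastOf f mid).2.1 := by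
  induction mid generalizing f with
  | nil => rfl
  | cons a t ih =>
    have h := ih (redStep f a)
    have h2 := getLast?_cons_getD a t
    cases t with
    | nil => simp only [List.foldl_cons] at h ⊢; rw [h]; rfl
    | cons b t' =>
      simp only [List.foldl_cons] at h ⊢
      rw [h]
      simp only [lastOf, List.getLast?_cons_cons]
      rfl

theorem headI_reverse_run (f : Brat) (mid : List Brat) :
    ((f :: mid).reverse).headI = lastOf f mid := by
  have h : ((f :: mid).reverse).head? = some (lastOf f mid) := by
    rw [List.head?_reverse, getLast?_cons_getD]
  cases hr : (f :: mid).reverse with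
  | nil => simp [hr] at h
  | cons a t =>
    rw [hr] at h
    simp only [List.head?_cons, Option.some.injEq] at h
    simp [h]

theorem lastOf_type (f : Brat) (mid : List Brat) (hu : uniform f mid) :
    (lastOf f mid).2.2.1 = f.2.2.1 := by
  unfold lastOf
  cases hm : mid.getLast? with
  | none => rfl
  | some a =>
    have : a ∈ mid := List.mem_of_getLast? hm
    simpa using hu a this

theorem main_loop (text_content : String) (rest : List Brat) :
    ∀ (f : Brat) (mid : List Brat) (runs : List (List Brat)), uniform f mid →
    (rest.foldl (mergeStepA text_content) (runs.map reduceRun, mid.foldl redStep f)).1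
      ++ [(rest.foldl (mergeStepA text_content) (runs.map reduceRun, mid.foldl redStep f)).2]
    = ((rest.foldl (groupStepB text_content) (runs, (f :: mid).reverse)).1
      ++ [(rest.foldl (groupStepB text_content) (runs, (f :: mid).reverse)).2.reverse]).map reduceRun := by
  induction rest with
  | nil =>
    intro f mid runs _
    simp [reduceRun_cons]
  | cons n rest' ih =>
    intro f mid runs hu
    have htype := redFold_type f mid
    have hend := redFold_end f mid
    have hlast := lastOf_type f mid hu
    have hhead := headI_reverse_run f mid
    simp only [List.foldl_cons]
    by_cases hc : ((lastOf f mid).2.2.1 = "NAME" ∨ (lastOf f mid).2.2.1 = "PATIENT") ∧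
        n.2.2.1 = (lastOf f mid).2.2.1 ∧
        PySem.Str.slice text_content (some (lastOf f mid).2.1) (some n.1) = " "
    · -- run extends
      obtain ⟨hc1, hc2, hc3⟩ := hc
      have hA : mergeStepA text_content (runs.map reduceRun, mid.foldl redStep f) n
          = (runs.map reduceRun, (mid ++ [n]).foldl redStep f) := by
        rw [List.foldl_append]
        simp only [mergeStepA, List.foldl_cons, List.foldl_nil]
        rw [if_pos, if_pos]
        · rfl
        · rw [hend]; exact hc3
        · rw [htype, ← hlast]; exact ⟨hc1, hc2⟩
      have hB : groupStepB text_content (runs, (f :: mid).reverse) n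
          = (runs, (f :: (mid ++ [n])).reverse) := by
        simp only [groupStepB, hhead]
        rw [if_pos]
        · simp
        · simp [runExtends, hc1, hc2, hc3]
      rw [hA, hB]
      exact ih f (mid ++ [n]) runs (by
        intro x hx
        rcases List.mem_append.mp hx with h | h
        · exact hu x h
        · simp only [List.mem_singleton] at h
          subst h
          rw [hc2, hlast])
    · -- run breaks
      have hA : mergeStepA text_content (runs.map reduceRun, mid.foldl redStep f) n
          = ((runs ++ [f :: mid]).map reduceRun, [].foldl redStep n) := by
        simp only [mergeStepA, List.map_append, List.map_cons, List.map_nil, List.foldl_nil]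
        have hcnd : ¬ (((mid.foldl redStep f).2.2.1 = "NAME" ∨ (mid.foldl redStep f).2.2.1 = "PATIENT") ∧
            n.2.2.1 = (mid.foldl redStep f).2.2.1 ∧
            PySem.Str.slice text_content (some (mid.foldl redStep f).2.1) (some n.1) = " ") := by
          rw [htype, hend, ← hlast] at *
          exact hc
        by_cases h1 : ((mid.foldl redStep f).2.2.1 = "NAME" ∨ (mid.foldl redStep f).2.2.1 = "PATIENT") ∧
            n.2.2.1 = (mid.foldl redStep f).2.2.1
        · rw [if_pos h1, if_neg]
          · simp [reduceRun_cons]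
          · intro h3; exact hcnd ⟨h1.1, h1.2, h3⟩
        · rw [if_neg h1]
          simp [reduceRun_cons]
      have hB : groupStepB text_content (runs, (f :: mid).reverse) n
          = (runs ++ [f :: mid], (n :: ([] : List Brat)).reverse) := by
        simp only [groupStepB, hhead]
        rw [if_neg]
        · simp
        · simp only [runExtends, decide_eq_true_eq]
          exact hc
      rw [hA, hB]
      exact ih n [] (runs ++ [f :: mid]) (by intro x hx; simp at hx)

-- ===== VERDICT (by name: the statement is the Claim_ definition above) =====
theorem merge_adjacent_names_spec : Claim_equal_merge_adjacent_names := by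
  intro annotations text_content _
  unfold Spec_merge_adjacent_names merge_adjacent_names merge_adjacent_names_alt
  by_cases h : annotations = []
  · simp [h]
  · rw [if_neg h, if_neg h]
    cases hs : PySem.List.sorted annotations (fun x => x.1) with
    | nil => rfl
    | cons c rest =>
      have := main_loop text_content rest c [] [] (by intro x hx; simp at hx)
      simpa using this
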